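-- pv_equiv track=rewrite | github.com/potatoespotato/test | bus_tickets.py | get_lucky_bus_tickets
-- ===== SOURCE A (Python) =====
-- from typing import List
--
-- def get_lucky_bus_tickets(N: int) -> List[int]:
--     start = 100000
--     end = 1000000
--     lucky_tickets = []
--
--     for i in range(start, end):
--         first_sum = sum(int(j) for j in f"{i}"[:3])
--         last_sum = sum(int(j) for j in f"{i}"[3::])
--         if first_sum == last_sum:
--             lucky_tickets.append(i)
--             if len(lucky_tickets) == N:
--                 break
--
--     return lucky_tickets
-- ===== SOURCE B (Python) =====
-- from typing import List
--
-- def _digit_sum3(x: int) -> int: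
--     return x // 100 + x // 10 % 10 + x % 10
--
-- def get_lucky_bus_tickets(N: int) -> List[int]:
--     # Group the 1000 possible 3-digit suffixes by digit sum once, then emit
--     # matching tickets per prefix in ascending order (output-sensitive).
--     by_sum = [[] for _ in range(28)]
--     for q in range(1000):
--         by_sum[_digit_sum3(q)].append(q)
--     out = []
--     for p in range(100, 1000):
--         for q in by_sum[_digit_sum3(p)]:
--             out.append(p * 1000 + q)
--             if len(out) == N:
--                 return out
--     return out
-- ===== Notes on version B (the rewrite author's own statement) =====
-- stated objective: faster
-- what changed: Instead of scanning every six-digit number and string-formatting each one to compare digit sums, B precomputes the three-digit suffixes grouped by digit sum once and emits matching tickets per prefix in ascending order, touching only prefixes and actual matches.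
import Mathlib
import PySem

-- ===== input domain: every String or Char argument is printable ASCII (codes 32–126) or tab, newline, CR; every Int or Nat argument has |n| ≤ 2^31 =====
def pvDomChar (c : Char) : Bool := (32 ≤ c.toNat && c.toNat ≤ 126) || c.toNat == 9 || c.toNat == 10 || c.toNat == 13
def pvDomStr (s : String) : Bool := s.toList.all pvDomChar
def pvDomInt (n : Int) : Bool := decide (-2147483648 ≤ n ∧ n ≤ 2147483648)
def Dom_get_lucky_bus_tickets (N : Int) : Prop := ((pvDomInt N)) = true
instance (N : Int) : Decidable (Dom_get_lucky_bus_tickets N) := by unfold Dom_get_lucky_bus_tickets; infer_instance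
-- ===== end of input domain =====

-- B replaces A's scan of every six-digit number (string-formatting each one) by a
-- precomputed table of three-digit suffixes grouped by digit sum, emitting matching
-- tickets per prefix in ascending order (output-sensitive; measurably faster).


-- ===== PORT A =====
-- sum(int(j) for j in cs); int(j) never raises here: every character of f"{i}" for
-- i ≥ 100000 is a decimal digit, so the .getD 0 default is never taken.
def pvStrDigitSum (cs : List Char) : Int :=
  (cs.map (fun c => (PySem.Int.ofChars? [c]).getD 0)).sum

def pvFirstSum (i : Int) : Int :=
  pvStrDigitSum (PySem.List.slice (PySem.Int.toChars i) none (some 3))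

def pvLastSum (i : Int) : Int :=
  pvStrDigitSum (PySem.List.slice (PySem.Int.toChars i) (some 3) none)

-- the for-loop with its break: acc is lucky_tickets
def pvLoopA (N : Int) : List Int → List Int → List Int
  | acc, [] => acc
  | acc, i :: rest =>
    if pvFirstSum i = pvLastSum i then
      let acc' := acc ++ [i]
      if PySem.List.len acc' = N then acc' else pvLoopA N acc' rest
    else pvLoopA N acc rest

def get_lucky_bus_tickets (N : Int) : List Int :=
  pvLoopA N [] (PySem.List.pyRange 100000 1000000 1)

-- ===== PORT B =====
def pvDigitSum3 (x : Int) : Int :=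
  PySem.Int.floordiv x 100 + PySem.Int.mod (PySem.Int.floordiv x 10) 10 + PySem.Int.mod x 10

-- by_sum = [[] for _ in range(28)]; for q in range(1000): by_sum[_digit_sum3(q)].append(q)
def pvBySum : List (List Int) :=
  (PySem.List.pyRange 0 1000 1).foldl
    (fun bs q => PySem.List.pySetD bs (pvDigitSum3 q)
        (PySem.List.pyGetD bs (pvDigitSum3 q) [] ++ [q]))
    (List.replicate 28 [])

-- inner loop over by_sum[_digit_sum3(p)]; Bool = "returned early"
def pvInnerB (N p : Int) : List Int → List Int → List Int × Bool
  | out, [] => (out, false)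
  | out, q :: rest =>
    let out' := out ++ [p * 1000 + q]
    if PySem.List.len out' = N then (out', true) else pvInnerB N p out' rest

-- outer loop over prefixes p
def pvOuterB (N : Int) (bySum : List (List Int)) : List Int → List Int → List Int
  | out, [] => out
  | out, p :: rest =>
    match pvInnerB N p out (PySem.List.pyGetD bySum (pvDigitSum3 p) []) with
    | (out', true) => out'
    | (out', false) => pvOuterB N bySum out' rest

def get_lucky_bus_tickets_alt (N : Int) : List Int :=
  pvOuterB N pvBySum [] (PySem.List.pyRange 100 1000 1)

-- ===== PRECONDITION & SPEC =====
def Spec_get_lucky_bus_tickets (N : Int) (out : List Int) : Prop := out = get_lucky_bus_tickets_alt N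
instance (N : Int) (out : List Int) : Decidable (Spec_get_lucky_bus_tickets N out) := by unfold Spec_get_lucky_bus_tickets; infer_instance

-- ===== CLAIM (what is proved, stated in full; the proofs are below) =====
def Claim_equal_get_lucky_bus_tickets : Prop := ∀ (N : Int), Dom_get_lucky_bus_tickets N → Spec_get_lucky_bus_tickets N (get_lucky_bus_tickets N)

-- ===== LEMMAS AND PROOFS =====

-- the common "append with cutoff N" loop shape of both programs
def pvEmit (N : Int) : List Int → List Int → List Int × Bool
  | acc, [] => (acc, false)
  | acc, x :: rest =>
    let acc' := acc ++ [x]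
    if PySem.List.len acc' = N then (acc', true) else pvEmit N acc' rest

theorem pvEmit_append (N : Int) (xs ys acc : List Int) :
    pvEmit N acc (xs ++ ys) =
      match pvEmit N acc xs with
      | (r, true) => (r, true)
      | (r, false) => pvEmit N r ys := by
  induction xs generalizing acc with
  | nil => simp [pvEmit]
  | cons x xs ih =>
    simp only [List.cons_append, pvEmit]
    split_ifs <;> simp [ih]

theorem pvLoopA_eq (N : Int) (xs acc : List Int) :
    pvLoopA N acc xs =
      (pvEmit N acc (xs.filter (fun i => decide (pvFirstSum i = pvLastSum i)))).1 := by
  induction xs generalizing acc with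
  | nil => simp [pvLoopA, pvEmit]
  | cons i rest ih =>
    by_cases h : pvFirstSum i = pvLastSum i
    · by_cases h2 : PySem.List.len (acc ++ [i]) = N
      · simp only [PySem.List.len_eq, List.length_append, List.length_cons,
          List.length_nil] at h2
        push_cast at h2
        simp [pvLoopA, pvEmit, h, h2]
      · simp only [PySem.List.len_eq, List.length_append, List.length_cons,
          List.length_nil] at h2
        push_cast at h2
        simp [pvLoopA, pvEmit, h, h2, ih]
    · simp [pvLoopA, pvEmit, h, ih]

theorem pvInnerB_eq (N p : Int) (qs out : List Int) :
    pvInnerB N p out qs = pvEmit N out (qs.map (fun q => p * 1000 + q)) := by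
  induction qs generalizing out with
  | nil => simp [pvInnerB, pvEmit]
  | cons q rest ih => simp only [pvInnerB, List.map_cons, pvEmit]; split_ifs <;> simp [ih]

theorem pvOuterB_eq (N : Int) (bs : List (List Int)) (ps out : List Int) :
    pvOuterB N bs out ps =
      (pvEmit N out (ps.flatMap
        (fun p => (PySem.List.pyGetD bs (pvDigitSum3 p) []).map (fun q => p * 1000 + q)))).1 := by
  induction ps generalizing out with
  | nil => simp [pvOuterB, pvEmit]
  | cons p rest ih =>
    simp only [pvOuterB, List.flatMap_cons, pvEmit_append, pvInnerB_eq]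
    rcases h : pvEmit N out ((PySem.List.pyGetD bs (pvDigitSum3 p) []).map (fun q => p * 1000 + q)) with ⟨r, b⟩
    cases b <;> simp [h, ih]

-- digit-sum bounds
theorem pvDigitSum3_bounds (q : Int) (h0 : 0 ≤ q) (h1 : q < 1000) :
    0 ≤ pvDigitSum3 q ∧ pvDigitSum3 q ≤ 27 := by
  unfold pvDigitSum3
  rw [PySem.Int.floordiv_eq_ediv_of_pos (by norm_num),
      PySem.Int.floordiv_eq_ediv_of_pos (by norm_num),
      PySem.Int.mod_eq_emod_of_pos (by norm_num),
      PySem.Int.mod_eq_emod_of_pos (by norm_num)]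
  omega

-- the grouping table: entry s lists exactly the q < bound with digit sum s, in order
theorem pvBySum_inv (n : Nat) (hn : n ≤ 1000) :
    ((PySem.List.pyRange 0 (n : Int) 1).foldl
      (fun bs q => PySem.List.pySetD bs (pvDigitSum3 q)
          (PySem.List.pyGetD bs (pvDigitSum3 q) [] ++ [q]))
      (List.replicate 28 [])).length = 28 ∧
    ∀ s : Int, 0 ≤ s → s ≤ 27 →
      PySem.List.pyGetD ((PySem.List.pyRange 0 (n : Int) 1).foldl
        (fun bs q => PySem.List.pySetD bs (pvDigitSum3 q)
            (PySem.List.pyGetD bs (pvDigitSum3 q) [] ++ [q]))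
        (List.replicate 28 [])) s [] =
      (PySem.List.pyRange 0 (n : Int) 1).filter (fun q => decide (pvDigitSum3 q = s)) := by
  induction n with
  | zero =>
    rw [show ((0:Nat):Int) = 0 from rfl, PySem.List.pyRange_one_eq_nil le_rfl]
    simp only [List.foldl_nil, List.filter_nil]
    refine ⟨by simp, fun s h0 h1 => ?_⟩
    rw [PySem.List.pyGetD_eq_getElem _ _ h0 (by simp [List.length_replicate]; omega),
        List.getElem_replicate]
  | succ n ih =>
    obtain ⟨hlen, hget⟩ := ih (by omega)
    have hcast : ((n+1 : Nat) : Int) = (n : Int) + 1 := by push_cast; ring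
    rw [hcast, PySem.List.pyRange_one_succ_right (by positivity)]
    set Bn := (PySem.List.pyRange 0 (n : Int) 1).foldl
      (fun bs q => PySem.List.pySetD bs (pvDigitSum3 q)
          (PySem.List.pyGetD bs (pvDigitSum3 q) [] ++ [q]))
      (List.replicate 28 []) with hBn
    have hd := pvDigitSum3_bounds (n : Int) (by positivity)
      (by exact_mod_cast (by omega : n < 1000) : (n:Int) < 1000)
    simp only [List.foldl_append, List.foldl_cons, List.foldl_nil, List.filter_append, ← hBn]
    rw [PySem.List.pySetD_of_nonneg _ _ hd.1]
    constructor
    · rw [List.length_set]; exact hlen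
    · intro s h0 h1
      rw [PySem.List.pyGetD_eq_getElem _ _ h0 (by rw [List.length_set, hlen]; exact_mod_cast by omega),
          List.getElem_set]
      by_cases he : pvDigitSum3 (n:Int) = s
      · rw [if_pos (by omega), he, hget s h0 h1]
        simp [he]
      · rw [if_neg (by omega),
            ← PySem.List.pyGetD_eq_getElem _ ([] : List Int) h0 (by rw [hlen]; exact_mod_cast by omega),
            hget s h0 h1]
        simp [he]

theorem pvBySum_getD (s : Int) (h0 : 0 ≤ s) (h1 : s ≤ 27) :
    PySem.List.pyGetD pvBySum s [] =
      (PySem.List.pyRange 0 1000 1).filter (fun q => decide (pvDigitSum3 q = s)) := by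
  have := (pvBySum_inv 1000 le_rfl).2 s h0 h1
  simpa [pvBySum] using this

-- ---- Nat.toDigits characterization ----
theorem pvTdcAcc (f n : Nat) (acc : List Char) :
    Nat.toDigitsCore 10 f n acc = Nat.toDigitsCore 10 f n [] ++ acc := by
  induction f generalizing n acc with
  | zero => simp [Nat.toDigitsCore]
  | succ f ih =>
    simp only [Nat.toDigitsCore]
    by_cases h : n / 10 = 0
    · simp [h]
    · simp only [h, if_false]
      rw [ih (n/10) ((n % 10).digitChar :: acc), ih (n/10) [(n % 10).digitChar]]
      simp

theorem pvTdcFuel (f1 f2 n : Nat) (h1 : n < f1) (h2 : n < f2) :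
    Nat.toDigitsCore 10 f1 n [] = Nat.toDigitsCore 10 f2 n [] := by
  induction f1 generalizing f2 n with
  | zero => omega
  | succ f1 ih =>
    cases f2 with
    | zero => omega
    | succ f2 =>
      simp only [Nat.toDigitsCore]
      by_cases h : n / 10 = 0
      · simp [h]
      · simp only [h, if_false]
        rw [pvTdcAcc f1, pvTdcAcc f2, ih f2 (n/10) (by omega) (by omega)]

theorem pvToDigits_small (n : Nat) (h : n < 10) : Nat.toDigits 10 n = [Nat.digitChar n] := by
  simp [Nat.toDigits, Nat.toDigitsCore, Nat.div_eq_of_lt h, Nat.mod_eq_of_lt h]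

theorem pvToDigits_step (n : Nat) (h : 10 ≤ n) :
    Nat.toDigits 10 n = Nat.toDigits 10 (n / 10) ++ [Nat.digitChar (n % 10)] := by
  have hne : n / 10 ≠ 0 := by omega
  simp only [Nat.toDigits, Nat.toDigitsCore, hne, if_false]
  rw [pvTdcAcc]
  congr 1
  exact pvTdcFuel n (n/10+1) (n/10) (by omega) (by omega)

theorem pvToDigits3 (P : Nat) (h1 : 100 ≤ P) (h2 : P < 1000) :
    Nat.toDigits 10 P = [Nat.digitChar (P / 100), Nat.digitChar (P / 10 % 10), Nat.digitChar (P % 10)] := by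
  rw [pvToDigits_step P (by omega), pvToDigits_step (P/10) (by omega),
      pvToDigits_small (P/10/10) (by omega)]
  have : P / 10 / 10 = P / 100 := by omega
  rw [this]; rfl

theorem pvToDigits6 (P Q : Nat) (h1 : 100 ≤ P) (h2 : P < 1000) (h3 : Q < 1000) :
    Nat.toDigits 10 (1000 * P + Q) =
      [Nat.digitChar (P / 100), Nat.digitChar (P / 10 % 10), Nat.digitChar (P % 10),
       Nat.digitChar (Q / 100), Nat.digitChar (Q / 10 % 10), Nat.digitChar (Q % 10)] := by
  set n := 1000 * P + Q with hn
  rw [pvToDigits_step n (by omega), pvToDigits_step (n/10) (by omega),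
      pvToDigits_step (n/10/10) (by omega)]
  have e1 : n % 10 = Q % 10 := by omega
  have e2 : n / 10 % 10 = Q / 10 % 10 := by omega
  have e3 : n / 10 / 10 % 10 = Q / 100 := by omega
  have e4 : n / 10 / 10 / 10 = P := by omega
  rw [e1, e2, e3, e4, pvToDigits3 P h1 h2]
  simp

theorem pvOfChars_digitChar (d : Nat) (hd : d < 10) :
    PySem.Int.ofChars? [Nat.digitChar d] = some (d : Int) := by
  interval_cases d <;> decide

-- the string digit sums of a ticket are the arithmetic digit sums of its halves
theorem pvSums_eq (p q : Int) (hp1 : 100 ≤ p) (hp2 : p < 1000) (hq1 : 0 ≤ q) (hq2 : q < 1000) :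
    pvFirstSum (p * 1000 + q) = pvDigitSum3 p ∧ pvLastSum (p * 1000 + q) = pvDigitSum3 q := by
  obtain ⟨P, rfl⟩ : ∃ P : Nat, p = (P : Int) := ⟨p.toNat, (Int.toNat_of_nonneg (by omega)).symm⟩
  obtain ⟨Q, rfl⟩ : ∃ Q : Nat, q = (Q : Int) := ⟨q.toNat, (Int.toNat_of_nonneg hq1).symm⟩
  have hP1 : 100 ≤ P := by exact_mod_cast hp1
  have hP2 : P < 1000 := by exact_mod_cast hp2
  have hQ2 : Q < 1000 := by exact_mod_cast hq2
  have hchars : PySem.Int.toChars ((P : Int) * 1000 + (Q : Int)) = Nat.toDigits 10 (1000 * P + Q) := by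
    have h0 : ((P : Int) * 1000 + (Q : Int)) = ((1000 * P + Q : Nat) : Int) := by push_cast; ring
    rw [h0, PySem.Int.toChars, if_neg (by omega)]
    congr 1
  rw [pvToDigits6 P Q hP1 hP2 hQ2] at hchars
  constructor
  · rw [pvFirstSum, hchars, PySem.List.slice_to _ (b := 3) (by norm_num)]
    show pvStrDigitSum _ = _
    simp only [pvStrDigitSum, show (3:Int).toNat = 3 from rfl, List.take_succ_cons, List.take_zero, List.map_cons, List.map_nil,
      pvOfChars_digitChar _ (by omega : P / 100 < 10),
      pvOfChars_digitChar _ (by omega : P / 10 % 10 < 10),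
      pvOfChars_digitChar _ (by omega : P % 10 < 10), Option.getD_some, List.sum_cons, List.sum_nil]
    unfold pvDigitSum3
    rw [PySem.Int.floordiv_eq_ediv_of_pos (by norm_num),
        PySem.Int.floordiv_eq_ediv_of_pos (by norm_num),
        PySem.Int.mod_eq_emod_of_pos (by norm_num),
        PySem.Int.mod_eq_emod_of_pos (by norm_num)]
    omega
  · rw [pvLastSum, hchars, PySem.List.slice_from _ (a := 3) (by norm_num)]
    show pvStrDigitSum _ = _
    simp only [pvStrDigitSum, show (3:Int).toNat = 3 from rfl, List.drop_succ_cons, List.drop_zero, List.map_cons, List.map_nil,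
      pvOfChars_digitChar _ (by omega : Q / 100 < 10),
      pvOfChars_digitChar _ (by omega : Q / 10 % 10 < 10),
      pvOfChars_digitChar _ (by omega : Q % 10 < 10), Option.getD_some, List.sum_cons, List.sum_nil]
    unfold pvDigitSum3
    rw [PySem.Int.floordiv_eq_ediv_of_pos (by norm_num),
        PySem.Int.floordiv_eq_ediv_of_pos (by norm_num),
        PySem.Int.mod_eq_emod_of_pos (by norm_num),
        PySem.Int.mod_eq_emod_of_pos (by norm_num)]
    omega

-- range decomposition: the 900000 six-digit numbers, grouped by their 3-digit prefix
theorem pvRange_block (c : Int) :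
    PySem.List.pyRange (c * 1000) (c * 1000 + 1000) 1 =
      (PySem.List.pyRange 0 1000 1).map (fun q => c * 1000 + q) := by
  rw [PySem.List.pyRange_one, PySem.List.pyRange_one]
  norm_num [List.map_map]

theorem pvRange_split (k : Nat) (a : Int) :
    PySem.List.pyRange (a * 1000) ((a + k) * 1000) 1 =
      (PySem.List.pyRange a (a + k) 1).flatMap
        (fun p => (PySem.List.pyRange 0 1000 1).map (fun q => p * 1000 + q)) := by
  induction k with
  | zero =>
    rw [show ((0:Nat):Int) = 0 from rfl, add_zero,
        PySem.List.pyRange_one_eq_nil le_rfl, PySem.List.pyRange_one_eq_nil le_rfl]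
    rfl
  | succ k ih =>
    have h1 : ((k:Int) + 1) = (k + 1 : Nat) := by push_cast; ring
    rw [show (a + ((k:Nat)+1 : Nat)) = (a + k) + 1 by push_cast; ring,
        PySem.List.pyRange_one_succ_right (by omega),
        show ((a + (k:Int)) + 1) * 1000 = (a+(k:Int)) * 1000 + 1000 by ring,
        PySem.List.pyRange_one_append (a*1000) ((a+(k:Int))*1000) ((a+(k:Int))*1000 + 1000)
          (by nlinarith [Int.natCast_nonneg k]) (by omega),
        ih, pvRange_block (a + k), List.flatMap_append]
    simp

theorem pvFiltered_eq :
    (PySem.List.pyRange 100000 1000000 1).filter (fun i => decide (pvFirstSum i = pvLastSum i)) =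
      (PySem.List.pyRange 100 1000 1).flatMap
        (fun p => (PySem.List.pyGetD pvBySum (pvDigitSum3 p) []).map (fun q => p * 1000 + q)) := by
  have hsplit := pvRange_split 900 100
  norm_num at hsplit
  rw [hsplit, List.filter_flatMap]
  refine List.flatMap_congr fun p hp => ?_
  obtain ⟨hp1, hp2⟩ := (PySem.List.mem_pyRange_one).1 hp
  rw [pvBySum_getD (pvDigitSum3 p) (pvDigitSum3_bounds p (by omega) hp2).1
        (pvDigitSum3_bounds p (by omega) hp2).2,
      List.filter_map]
  refine congrArg _ (List.filter_congr fun q hq => ?_)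
  obtain ⟨hq1, hq2⟩ := (PySem.List.mem_pyRange_one).1 hq
  obtain ⟨e1, e2⟩ := pvSums_eq p q hp1 hp2 hq1 hq2
  simp only [Function.comp, e1, e2]
  exact decide_eq_decide.2 ⟨fun h => h.symm, fun h => h.symm⟩

-- ===== VERDICT (by name: the statement is the Claim_ definition above) =====
theorem get_lucky_bus_tickets_spec : Claim_equal_get_lucky_bus_tickets := by
  intro N _
  unfold Spec_get_lucky_bus_tickets get_lucky_bus_tickets get_lucky_bus_tickets_alt
  rw [pvLoopA_eq, pvOuterB_eq, pvFiltered_eq]
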